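-- pv_equiv track=rewrite | github.com/partlyjadedyouth/callective-report-generator | src/participant_id_manager.py | match_with_csv_data
-- ===== SOURCE A (Python) =====
-- def match_with_csv_data(name, team, participant_info):
--     """
--     CSV 파일의 참가자 정보와 매칭합니다.
--
--     Args:
--         name (str): 참가자 이름
--         team (str): 참가자 소속 팀
--         participant_info (dict): CSV에서 로드한 참가자 정보 사전
--
--     Returns:
--         tuple: (matched_team, matched_participant) - 매칭된 팀과 참가자 정보
--     """
--     matched_participant = None
--     matched_team = team
--
--     for (p_name, p_team), p_data in participant_info.items():
--         # 이름과 팀으로 정확히 일치하는 경우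
--         if p_name == name and p_team == team:
--             matched_participant = p_data
--             matched_team = p_team
--             break
--         # 이름만 일치하고 팀 정보가 없거나 "Unknown"인 경우
--         elif (
--             p_name == name
--             and (team == "Unknown" or not team)
--             and matched_participant is None
--         ):
--             matched_participant = p_data
--             matched_team = p_team
--
--     return matched_team, matched_participant
-- ===== SOURCE B (Python) =====
-- def match_with_csv_data(name, team, participant_info):
--     wild = team == "Unknown" or not team
--     ranked = [
--         ((0 if p_team == team else 1), i, p_team, p_data)
--         for i, ((p_name, p_team), p_data) in enumerate(participant_info.items())
--         if p_name == name and (p_team == team or wild)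
--     ]
--     if not ranked:
--         return team, None
--     _, _, m_team, m_data = min(ranked, key=lambda t: (t[0], t[1]))
--     return m_team, m_data
-- ===== Notes on version B (the rewrite author's own statement) =====
-- stated objective: alternative
-- what changed: Replaces A's single scan with mutable accumulators and a break by a rank-and-select pipeline: build the list of candidates ranked by (exactness, position) and pick the minimum.
import Mathlib
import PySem

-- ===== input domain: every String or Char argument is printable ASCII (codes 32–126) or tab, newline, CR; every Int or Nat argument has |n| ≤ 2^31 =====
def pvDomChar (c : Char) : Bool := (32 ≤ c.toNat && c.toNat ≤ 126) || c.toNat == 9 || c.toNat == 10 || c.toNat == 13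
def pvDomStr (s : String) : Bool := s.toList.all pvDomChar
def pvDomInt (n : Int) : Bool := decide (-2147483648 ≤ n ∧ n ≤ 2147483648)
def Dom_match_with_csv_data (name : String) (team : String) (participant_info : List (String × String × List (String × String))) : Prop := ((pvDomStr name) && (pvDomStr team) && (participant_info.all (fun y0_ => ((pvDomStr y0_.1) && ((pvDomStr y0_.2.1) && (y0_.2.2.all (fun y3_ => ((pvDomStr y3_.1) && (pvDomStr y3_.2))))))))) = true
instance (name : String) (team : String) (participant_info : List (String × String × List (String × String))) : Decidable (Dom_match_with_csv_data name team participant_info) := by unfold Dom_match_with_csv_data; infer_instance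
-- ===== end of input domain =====

-- B replaces A's accumulator-and-break scan by a rank-and-select pipeline (build ranked candidates, pick the minimum by (exactness, position)); same return values.
-- ===== PORT A =====
-- A's for-loop over items with mutable (matched_team, matched_participant) and break, as structural recursion on the same state
def pvGoA (name : String) (team : String) : List (String × String × List (String × String)) → String → Option (List (String × String)) → String × (Option (List (String × String)))
  | [], mt, mp => (mt, mp)
  | (p_name, p_team, p_data) :: rest, mt, mp =>
    if p_name = name ∧ p_team = team then
      (p_team, some p_data)      -- break
    else if p_name = name ∧ (team = "Unknown" ∨ ¬ (team ≠ "")) ∧ mp = none then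
      pvGoA name team rest p_team (some p_data)
    else
      pvGoA name team rest mt mp

def match_with_csv_data (name : String) (team : String) (participant_info : List (String × String × List (String × String))) : String × (Option (List (String × String))) :=
  pvGoA name team participant_info team none

-- ===== PORT B =====
-- the ranked-candidates comprehension over enumerate(items): rank 0 = exact, 1 = name-only (wild)
def pvRankedB (name : String) (team : String) (wild : Bool) : Nat → List (String × String × List (String × String)) → List (Nat × Nat × String × List (String × String))
  | _, [] => []
  | i, (p_name, p_team, p_data) :: rest =>
    if p_name = name ∧ (p_team = team ∨ wild = true) then
      ((if p_team = team then 0 else 1), i, p_team, p_data) :: pvRankedB name team wild (i + 1) rest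
    else pvRankedB name team wild (i + 1) rest

-- min(ranked, key=λt. (t[0], t[1])): first element with the lexicographically least (rank, index)
def pvMinB : List (Nat × Nat × String × List (String × String)) → Option (Nat × Nat × String × List (String × String))
  | [] => none
  | x :: rest =>
    match pvMinB rest with
    | none => some x
    | some m => if x.1 < m.1 ∨ (x.1 = m.1 ∧ x.2.1 ≤ m.2.1) then some x else some m

def match_with_csv_data_alt (name : String) (team : String) (participant_info : List (String × String × List (String × String))) : String × (Option (List (String × String))) :=
  let wild : Bool := (team == "Unknown" || team == "")
  match pvMinB (pvRankedB name team wild 0 participant_info) with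
  | none => (team, none)
  | some (_, _, m_team, m_data) => (m_team, some m_data)

-- ===== PRECONDITION & SPEC =====
def Spec_match_with_csv_data (name : String) (team : String) (participant_info : List (String × String × List (String × String))) (out : String × (Option (List (String × String)))) : Prop := out = match_with_csv_data_alt name team participant_info
instance (name : String) (team : String) (participant_info : List (String × String × List (String × String))) (out : String × (Option (List (String × String)))) : Decidable (Spec_match_with_csv_data name team participant_info out) := by unfold Spec_match_with_csv_data; infer_instance

-- ===== CLAIM (what is proved, stated in full; the proofs are below) =====
def Claim_equal_match_with_csv_data : Prop := ∀ (name : String) (team : String) (participant_info : List (String × String × List (String × String))), Dom_match_with_csv_data name team participant_info → Spec_match_with_csv_data name team participant_info (match_with_csv_data name team participant_info)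

-- ===== LEMMAS AND PROOFS =====
-- proof-only helpers: first exact match, first name match
def pvLookupB (name : String) (team : String) : List (String × String × List (String × String)) → Option (List (String × String))
  | [] => none
  | (p_name, p_team, p_data) :: rest =>
    if p_name = name ∧ p_team = team then some p_data else pvLookupB name team rest

def pvScanB (name : String) : List (String × String × List (String × String)) → Option (String × List (String × String))
  | [] => none
  | (p_name, p_team, p_data) :: rest =>
    if p_name = name then some (p_team, p_data) else pvScanB name rest

-- characterization of A's loop (invariant over the accumulator state)
theorem pvGoA_eq (name team : String) (xs : List (String × String × List (String × String))) :
    ∀ (mt : String) (mp : Option (List (String × String))),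
    pvGoA name team xs mt mp =
      match pvLookupB name team xs with
      | some hit => (team, some hit)
      | none =>
        if (team = "Unknown" ∨ team = "") ∧ mp = none then
          match pvScanB name xs with
          | some (p_team, p_data) => (p_team, some p_data)
          | none => (mt, mp)
        else (mt, mp) := by
  induction xs with
  | nil =>
    intro mt mp
    simp only [pvGoA, pvLookupB, pvScanB]
    split_ifs <;> rfl
  | cons hd tl ih =>
    intro mt mp
    obtain ⟨p_name, p_team, p_data⟩ := hd
    by_cases hn : p_name = name
    · by_cases hpt : p_team = team
      · simp [pvGoA, pvLookupB, hn, hpt]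
      · by_cases hu : team = "Unknown" ∨ team = ""
        · have hu' : team = "Unknown" ∨ ¬ (team ≠ "") := by tauto
          by_cases hmp : mp = none
          · cases h : pvLookupB name team tl <;>
              simp [pvGoA, pvLookupB, pvScanB, hn, hpt, hmp, hu, hu', ih, h]
          · cases h : pvLookupB name team tl <;>
              simp [pvGoA, pvLookupB, pvScanB, hn, hpt, hmp, hu, hu', ih, h]
        · have hu' : ¬ (team = "Unknown" ∨ ¬ (team ≠ "")) := by tauto
          cases h : pvLookupB name team tl <;>
            simp [pvGoA, pvLookupB, pvScanB, hn, hpt, hu, hu', ih, h]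
    · cases h : pvLookupB name team tl <;>
        simp [pvGoA, pvLookupB, pvScanB, hn, ih, h]

-- index lower bound for the ranked list
theorem pvRankedB_idx_ge (name team : String) (wild : Bool) (xs : List (String × String × List (String × String))) :
    ∀ (i0 : Nat) (t : Nat × Nat × String × List (String × String)), t ∈ pvRankedB name team wild i0 xs → i0 ≤ t.2.1 := by
  induction xs with
  | nil => intro i0 t h; simp [pvRankedB] at h
  | cons hd tl ih =>
    intro i0 t h
    obtain ⟨p_name, p_team, p_data⟩ := hd
    simp only [pvRankedB] at h
    split_ifs at h with hc hpt
    · rcases List.mem_cons.mp h with h1 | h2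
      · subst h1; simp
      · have := ih (i0 + 1) t h2; omega
    · rcases List.mem_cons.mp h with h1 | h2
      · subst h1; simp
      · have := ih (i0 + 1) t h2; omega
    · have := ih (i0 + 1) t h; omega

theorem pvMinB_mem (l : List (Nat × Nat × String × List (String × String))) (m : Nat × Nat × String × List (String × String)) (h : pvMinB l = some m) : m ∈ l := by
  induction l with
  | nil => simp [pvMinB] at h
  | cons x rest ih =>
    simp only [pvMinB] at h
    cases hr : pvMinB rest with
    | none => simp [hr] at h; simp [h]
    | some m' =>
      simp only [hr] at h
      split_ifs at h <;> simp_all [List.mem_cons]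

-- a rank-0 head at index i0 beats every element of a ranked tail that starts at i0+1
theorem pvMinB_cons_zero (name team : String) (wild : Bool) (i0 : Nat) (tl : List (String × String × List (String × String))) (pt : String) (pd : List (String × String)) :
    pvMinB ((0, i0, pt, pd) :: pvRankedB name team wild (i0 + 1) tl) = some (0, i0, pt, pd) := by
  simp only [pvMinB]
  cases hr : pvMinB (pvRankedB name team wild (i0 + 1) tl) with
  | none => rfl
  | some m =>
    have hm := pvRankedB_idx_ge name team wild tl (i0 + 1) m (pvMinB_mem _ _ hr)
    have : (0 : Nat) < m.1 ∨ (0 = m.1 ∧ i0 ≤ m.2.1) := by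
      rcases Nat.eq_zero_or_pos m.1 with h0 | h0
      · exact Or.inr ⟨h0.symm, by omega⟩
      · exact Or.inl h0
    simp [this]

-- characterization of B's selection: min over the ranked list is the first exact match
-- (rank 0), else — when wild — the first name match (rank 1), carrying an index bound.
theorem pvMinB_ranked (name team : String) (wild : Bool) (xs : List (String × String × List (String × String))) :
    ∀ i0 : Nat,
    match pvLookupB name team xs with
    | some pd => ∃ j, i0 ≤ j ∧ pvMinB (pvRankedB name team wild i0 xs) = some (0, j, team, pd)
    | none =>
      match (if wild then pvScanB name xs else none) with
      | some (pt, pd) => ∃ j, i0 ≤ j ∧ pvMinB (pvRankedB name team wild i0 xs) = some (1, j, pt, pd)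
      | none => pvMinB (pvRankedB name team wild i0 xs) = none := by
  induction xs with
  | nil =>
    intro i0
    cases wild <;> simp [pvLookupB, pvScanB, pvRankedB, pvMinB]
  | cons hd tl ih =>
    intro i0
    obtain ⟨p_name, p_team, p_data⟩ := hd
    have ih' := ih (i0 + 1)
    by_cases hn : p_name = name
    · by_cases hpt : p_team = team
      · -- exact head: rank 0 at index i0 wins over everything behind it
        subst hpt
        simp only [pvLookupB, pvRankedB, hn, and_self, if_pos, true_or, if_true, if_pos trivial]
        exact ⟨i0, le_refl _, pvMinB_cons_zero name p_team wild i0 tl p_team p_data⟩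
      · by_cases hw : wild = true
        · -- name-only head, wild: rank 1 at index i0; an exact match behind it wins, else the head
          subst hw
          simp only [pvLookupB, pvScanB, pvRankedB, hn, hpt, and_false, false_and, if_neg, if_true,
            true_and, or_true, if_pos, and_true, not_false_iff, if_false] at ih' ⊢
          cases hl : pvLookupB name team tl with
          | some pd =>
            simp only [hl] at ih'
            obtain ⟨j, hj, hmin⟩ := ih'
            exact ⟨j, by omega, by simp [pvMinB, hmin, hpt]⟩
          | none =>
            simp only [hl, if_pos rfl] at ih' ⊢
            refine ⟨i0, le_refl _, ?_⟩
            cases hs : pvScanB name tl with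
            | none =>
              simp only [hs] at ih'
              simp [pvMinB, ih']
            | some q =>
              obtain ⟨qt, qd⟩ := q
              simp only [hs] at ih'
              obtain ⟨j, hj, hmin⟩ := ih'
              simp [pvMinB, hmin, (show i0 ≤ j by omega)]
        · -- name-only head, not wild: filtered out of the candidates; the goal's scan branch is dead
          have hwf : wild = false := by simpa using hw
          subst hwf
          simp only [pvLookupB, pvScanB, pvRankedB, hn, hpt, and_false, false_and, or_false,
            if_false, Bool.false_eq_true, and_true, true_and, if_neg, not_false_iff] at ih' ⊢
          cases hl : pvLookupB name team tl with
          | some pd =>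
            simp only [hl] at ih'
            obtain ⟨j, hj, hmin⟩ := ih'
            exact ⟨j, by omega, hmin⟩
          | none =>
            simp only [hl] at ih' ⊢
            simpa using ih'
    · -- head name does not match: filtered out; lookup and scan pass through
      simp only [pvLookupB, pvScanB, pvRankedB, hn, false_and, if_false, if_neg,
        not_false_iff] at ih' ⊢
      cases hl : pvLookupB name team tl with
      | some pd =>
        simp only [hl] at ih'
        obtain ⟨j, hj, hmin⟩ := ih'
        exact ⟨j, by omega, hmin⟩
      | none =>
        simp only [hl] at ih' ⊢
        cases wild with
        | false => simpa using ih'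
        | true =>
          simp only [if_pos rfl] at ih' ⊢
          cases hs : pvScanB name tl with
          | none => simp only [hs] at ih'; simpa using ih'
          | some q =>
            obtain ⟨qt, qd⟩ := q
            simp only [hs] at ih'
            obtain ⟨j, hj, hmin⟩ := ih'
            exact ⟨j, by omega, hmin⟩

-- ===== VERDICT (by name: the statement is the Claim_ definition above) =====
theorem match_with_csv_data_spec : Claim_equal_match_with_csv_data := by
  intro name team participant_info _
  unfold Spec_match_with_csv_data match_with_csv_data match_with_csv_data_alt
  rw [pvGoA_eq]
  have h := pvMinB_ranked name team (team == "Unknown" || team == "") participant_info 0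
  by_cases hu : team = "Unknown" ∨ team = ""
  · have hw : (team == "Unknown" || team == "") = true := by
      rcases hu with h1 | h1 <;> simp [h1]
    simp only [hw, if_true] at h ⊢
    cases hl : pvLookupB name team participant_info with
    | some pd =>
      simp only [hl] at h
      obtain ⟨j, _, hmin⟩ := h
      simp [hmin]
    | none =>
      simp only [hl] at h
      rw [if_pos ⟨hu, trivial⟩]
      cases hs : pvScanB name participant_info with
      | some q =>
        obtain ⟨qt, qd⟩ := q
        simp only [hs] at h
        obtain ⟨j, _, hmin⟩ := h
        simp [hmin]
      | none =>
        simp only [hs] at h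
        simp [h]
  · have hw : (team == "Unknown" || team == "") = false := by
      simp only [not_or] at hu
      simp [hu.1, hu.2]
    simp only [hw, Bool.false_eq_true, if_false] at h ⊢
    cases hl : pvLookupB name team participant_info with
    | some pd =>
      simp only [hl] at h
      obtain ⟨j, _, hmin⟩ := h
      simp [hmin]
    | none =>
      simp only [hl] at h
      rw [if_neg (by tauto)]
      simp [h]
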